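-- pv_equiv track=rewrite | github.com/eNextHub/LUCA | luca/utils.py | equation_separator
-- ===== SOURCE A (Python) =====
-- def equation_separator(equation):
--
--     counter = 0
--     holder = []
--     for c,s in enumerate(equation):
--         if s in ("*/+-"):
--
--             holder.extend(
--                 [f"[{equation[counter:c]}]" , s]
--             )
--
--             counter = c+1
--
--     if not holder:
--         return [f"[{equation}]"]
--
--     return holder
-- ===== SOURCE B (Python) =====
-- def equation_separator(equation):
--     # tokenize into (segment, operator) pairs in one pass, then reshape
--     pairs, cur = [], ''
--     for ch in equation:
--         if ch in '*/+-':
--             pairs.append((cur, ch))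
--             cur = ''
--         else:
--             cur += ch
--     out = []
--     for seg, op in pairs:
--         out += ['[' + seg + ']', op]
--     return out or ['[' + equation + ']']
-- ===== Notes on version B (the rewrite author's own statement) =====
-- stated objective: simpler
-- what changed: B replaces A's index/counter scan with global slicing by a tokenizer that accumulates the current segment directly into (segment, operator) pairs, then a separate reshape pass builds the bracketed output.
import Mathlib
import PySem

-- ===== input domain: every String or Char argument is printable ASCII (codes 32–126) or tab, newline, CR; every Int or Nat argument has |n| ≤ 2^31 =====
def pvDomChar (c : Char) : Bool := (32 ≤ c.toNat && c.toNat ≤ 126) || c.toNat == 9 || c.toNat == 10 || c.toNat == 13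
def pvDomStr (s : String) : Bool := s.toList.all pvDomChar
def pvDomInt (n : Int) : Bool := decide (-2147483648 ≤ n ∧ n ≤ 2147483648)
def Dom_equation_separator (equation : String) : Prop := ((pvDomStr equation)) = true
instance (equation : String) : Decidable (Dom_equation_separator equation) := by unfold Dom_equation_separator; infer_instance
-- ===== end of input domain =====

-- B change: A's index/counter scan with global slicing is replaced by a tokenizer into
-- (segment, operator) pairs plus a separate reshape pass (objective: simpler).

-- ===== PORT A =====
-- one step of A's loop body: state (counter, holder), item (c, s) from enumerate
def esA_step (eq : List Char) (st : Int × List String) (p : Int × Char) : Int × List String :=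
  if p.2 ∈ (['*', '/', '+', '-'] : List Char) then
    (p.1 + 1,
     st.2 ++ [String.ofList ('[' :: PySem.List.slice eq (some st.1) (some p.1) ++ [']']),
              String.ofList [p.2]])
  else st

def equation_separator (equation : String) : List String :=
  let eq := equation.toList
  let st := (PySem.List.enumerate eq 0).foldl (esA_step eq) (0, [])
  if st.2 = [] then [String.ofList ('[' :: eq ++ [']'])] else st.2

-- ===== PORT B =====
-- one step of B's tokenizer: state (pairs, cur)
def esB_step (st : List (List Char × Char) × List Char) (ch : Char) :
    List (List Char × Char) × List Char :=
  if ch ∈ (['*', '/', '+', '-'] : List Char) then (st.1 ++ [(st.2, ch)], [])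
  else (st.1, st.2 ++ [ch])

-- B's reshape loop: out += ['[' + seg + ']', op]
def esB_emit (acc : List String) (p : List Char × Char) : List String :=
  acc ++ [String.ofList ('[' :: p.1 ++ [']']), String.ofList [p.2]]

def equation_separator_alt (equation : String) : List String :=
  let scan := equation.toList.foldl esB_step ([], [])
  let out := scan.1.foldl esB_emit []
  if out = [] then [String.ofList ('[' :: equation.toList ++ [']'])] else out

-- ===== PRECONDITION & SPEC =====
def Spec_equation_separator (equation : String) (out : List String) : Prop := out = equation_separator_alt equation
instance (equation : String) (out : List String) : Decidable (Spec_equation_separator equation out) := by unfold Spec_equation_separator; infer_instance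

-- ===== CLAIM (what is proved, stated in full; the proofs are below) =====
def Claim_equal_equation_separator : Prop := ∀ (equation : String), Dom_equation_separator equation → Spec_equation_separator equation (equation_separator equation)

-- ===== LEMMAS AND PROOFS =====

-- common characterization: tokenize cs (with pending segment cur) into (segment, op) pairs
def esTok (cur : List Char) : List Char → List (List Char × Char)
  | [] => []
  | ch :: rest =>
    if ch ∈ (['*', '/', '+', '-'] : List Char) then (cur, ch) :: esTok [] rest
    else esTok (cur ++ [ch]) rest

def esFlat (l : List (List Char × Char)) : List String :=
  l.flatMap fun p => [String.ofList ('[' :: p.1 ++ [']']), String.ofList [p.2]]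

lemma esB_fold (cs : List Char) :
    ∀ (ps : List (List Char × Char)) (cur : List Char),
      cs.foldl esB_step (ps, cur) = (ps ++ esTok cur cs, (cs.foldl esB_step (ps, cur)).2) := by
  induction cs with
  | nil => intro ps cur; simp [esTok]
  | cons ch rest ih =>
    intro ps cur
    by_cases h : ch ∈ (['*', '/', '+', '-'] : List Char)
    · simp only [List.foldl_cons, esB_step, h, if_pos, esTok]
      rw [ih]; simp
    · simp only [List.foldl_cons, esB_step, h, esTok, if_false]
      rw [ih]

lemma esB_emit_fold (l : List (List Char × Char)) :
    ∀ acc, l.foldl esB_emit acc = acc ++ esFlat l := by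
  induction l with
  | nil => intro acc; simp [esFlat]
  | cons p rest ih => intro acc; simp [esB_emit, esFlat, ih]

lemma esA_fold (eq : List Char) (cs : List Char) :
    ∀ (i k : Nat) (h : List String), k ≤ i → eq.drop i = cs →
      ((PySem.List.enumerate cs (i : Int)).foldl (esA_step eq) ((k : Int), h)).2 =
        h ++ esFlat (esTok ((eq.drop k).take (i - k)) cs) := by
  induction cs with
  | nil => intro i k h _ _; simp [esTok, esFlat]
  | cons ch rest ih =>
    intro i k h hk hdrop
    have hdrop' : eq.drop (i + 1) = rest := by
      rw [← List.drop_drop, hdrop]; simp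
    rw [PySem.List.enumerate_cons, List.foldl_cons]
    by_cases hop : ch ∈ (['*', '/', '+', '-'] : List Char)
    · simp only [esA_step, hop, if_pos]
      have hsl : PySem.List.slice eq (some (k : Int)) (some (i : Int)) =
          (eq.drop k).take (i - k) := PySem.List.slice_natCast eq k i
      have : ((i : Int) + 1) = ((i + 1 : Nat) : Int) := by push_cast; ring
      rw [this, ih (i + 1) (i + 1) _ (le_refl _) hdrop']
      simp [esTok, hop, esFlat, hsl]
    · simp only [esA_step, hop, if_false]
      have : ((i : Int) + 1) = ((i + 1 : Nat) : Int) := by push_cast; ring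
      rw [this, ih (i + 1) k h (by omega) hdrop']
      have hcur : (eq.drop k).take (i + 1 - k) = (eq.drop k).take (i - k) ++ [ch] := by
        have h1 : i + 1 - k = (i - k) + 1 := by omega
        have h2 : (eq.drop k).drop (i - k) = ch :: rest := by
          rw [List.drop_drop]
          have h3 : k + (i - k) = i := by omega
          rw [h3, hdrop]
        rw [h1, List.take_add, h2]
        simp
      rw [hcur]
      simp [esTok, hop]

-- ===== VERDICT (by name: the statement is the Claim_ definition above) =====
theorem equation_separator_spec : Claim_equal_equation_separator := by
  intro equation _
  unfold Spec_equation_separator equation_separator equation_separator_alt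
  dsimp only
  have hA := esA_fold equation.toList equation.toList 0 0 [] (le_refl _) (by simp)
  have hB := esB_fold equation.toList [] []
  simp only [Nat.cast_zero] at hA
  rw [hA, hB, esB_emit_fold]
  simp
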